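-- pv_equiv track=rewrite | github.com/project-airos/airos-voice-agent | apps/podcast-generator/script_segmenter.py | find_split_index
-- ===== SOURCE A (Python) =====
-- from typing import Iterable, List, Optional, Tuple
--
-- def find_split_index(text: str, max_length: int, split_marks: Iterable[str]) -> int:
--     """Find a split index at or before max_length using provided marks or whitespace.
--
--     Copied from dora-text-segmenter for sentence-aware splitting.
--     """
--     if max_length <= 0:
--         return -1
--
--     limit = min(len(text), max_length)
--
--     # Try to split at punctuation marks first
--     if split_marks:
--         for idx in range(limit, 0, -1):
--             if text[idx - 1] in split_marks:
--                 return idx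
--
--     # Fall back to whitespace
--     for idx in range(limit, 0, -1):
--         if text[idx - 1].isspace():
--             return idx
--
--     return -1
-- ===== SOURCE B (Python) =====
-- def find_split_index(text: str, max_length: int, split_marks) -> int:
--     """Single backward pass: return the rightmost mark index at or before the
--     limit; remember the rightmost whitespace index as a fallback."""
--     if max_length <= 0:
--         return -1
--     ws = -1
--     for idx in range(min(len(text), max_length), 0, -1):
--         if split_marks and text[idx - 1] in split_marks:
--             return idx
--         if ws == -1 and text[idx - 1].isspace():
--             ws = idx
--     return ws
-- ===== Notes on version B (the rewrite author's own statement) =====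
-- stated objective: simpler
-- what changed: Replaces A's two separate backward scans (marks pass, then whitespace pass) by one fused backward pass that returns immediately on a mark and records the first whitespace seen as a fallback.
import Mathlib
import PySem

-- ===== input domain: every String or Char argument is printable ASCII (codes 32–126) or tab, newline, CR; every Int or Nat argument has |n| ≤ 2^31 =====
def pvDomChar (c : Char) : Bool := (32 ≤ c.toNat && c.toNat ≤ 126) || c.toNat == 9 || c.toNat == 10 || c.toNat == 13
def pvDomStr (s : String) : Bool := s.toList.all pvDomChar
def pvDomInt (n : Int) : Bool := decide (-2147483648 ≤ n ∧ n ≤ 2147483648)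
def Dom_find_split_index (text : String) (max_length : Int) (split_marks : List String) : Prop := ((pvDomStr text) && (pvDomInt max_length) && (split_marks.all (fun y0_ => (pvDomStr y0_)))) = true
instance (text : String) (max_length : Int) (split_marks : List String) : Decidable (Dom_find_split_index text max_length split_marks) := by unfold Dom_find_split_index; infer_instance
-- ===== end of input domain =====

-- B fuses A's two backward scans into one pass (simpler, same behaviour); ports below follow each source's structure.

-- shared char tests: Python's `text[idx-1] in split_marks` and `text[idx-1].isspace()`
def pvMemMark (text : String) (split_marks : List String) (idx : Int) : Bool :=
  match PySem.Str.pyGet? text (idx - 1) with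
  | some c => split_marks.contains (String.ofList [c])
  | none => false

def pvIsSpaceAt (text : String) (idx : Int) : Bool :=
  match PySem.Str.pyGet? text (idx - 1) with
  | some c => PySem.Chars.isspace c
  | none => false

-- ===== PORT A =====
-- first loop of A: `for idx in range(limit, 0, -1): if text[idx-1] in split_marks: return idx`
def pvMarkLoop (text : String) (split_marks : List String) : List Int → Option Int
  | [] => none
  | idx :: rest =>
      if pvMemMark text split_marks idx then some idx
      else pvMarkLoop text split_marks rest

-- second loop of A: `for idx in range(limit, 0, -1): if text[idx-1].isspace(): return idx`
def pvWsLoop (text : String) : List Int → Option Int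
  | [] => none
  | idx :: rest =>
      if pvIsSpaceAt text idx then some idx
      else pvWsLoop text rest

def find_split_index (text : String) (max_length : Int) (split_marks : List String) : Int :=
  if max_length ≤ 0 then -1
  else
    let limit : Int := min (PySem.Str.len text) max_length
    let fromMarks : Option Int :=
      if split_marks ≠ [] then pvMarkLoop text split_marks (PySem.List.pyRange limit 0 (-1))
      else none
    match fromMarks with
    | some idx => idx
    | none =>
        match pvWsLoop text (PySem.List.pyRange limit 0 (-1)) with
        | some idx => idx
        | none => -1

-- ===== PORT B =====
-- B's single fused backward pass with the whitespace fallback accumulator `ws` (initially -1)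
def pvFusedLoop (text : String) (split_marks : List String) : Int → List Int → Int
  | ws, [] => ws
  | ws, idx :: rest =>
      if decide (split_marks ≠ []) && pvMemMark text split_marks idx then idx
      else if ws == -1 && pvIsSpaceAt text idx then pvFusedLoop text split_marks idx rest
      else pvFusedLoop text split_marks ws rest

def find_split_index_alt (text : String) (max_length : Int) (split_marks : List String) : Int :=
  if max_length ≤ 0 then -1
  else
    pvFusedLoop text split_marks (-1)
      (PySem.List.pyRange (min (PySem.Str.len text) max_length) 0 (-1))

-- ===== PRECONDITION & SPEC =====
def Spec_find_split_index (text : String) (max_length : Int) (split_marks : List String) (out : Int) : Prop := out = find_split_index_alt text max_length split_marks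
instance (text : String) (max_length : Int) (split_marks : List String) (out : Int) : Decidable (Spec_find_split_index text max_length split_marks out) := by unfold Spec_find_split_index; infer_instance

-- ===== CLAIM (what is proved, stated in full; the proofs are below) =====
def Claim_equal_find_split_index : Prop := ∀ (text : String) (max_length : Int) (split_marks : List String), Dom_find_split_index text max_length split_marks → Spec_find_split_index text max_length split_marks (find_split_index text max_length split_marks)

-- ===== LEMMAS AND PROOFS =====

-- the `split_marks and …` guard is redundant for membership: no char is in an empty list
theorem pvMemMark_guard (text : String) (split_marks : List String) (idx : Int) :
    (decide (split_marks ≠ []) && pvMemMark text split_marks idx) = pvMemMark text split_marks idx := by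
  cases split_marks with
  | nil =>
      unfold pvMemMark
      cases PySem.Str.pyGet? text (idx - 1) <;> simp
  | cons m ms => simp

-- once ws is set (ws ≠ -1), the fused loop only looks for a mark
theorem pvFusedLoop_set (text : String) (split_marks : List String) (ws : Int) (hws : ws ≠ -1) :
    ∀ L : List Int, pvFusedLoop text split_marks ws L =
      match pvMarkLoop text split_marks L with
      | some idx => idx
      | none => ws := by
  intro L
  induction L with
  | nil => simp [pvFusedLoop, pvMarkLoop]
  | cons idx rest ih =>
      simp only [pvFusedLoop, pvMarkLoop, pvMemMark_guard]
      by_cases h : pvMemMark text split_marks idx = true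
      · simp [h]
      · simp [h, hws, ih]

-- the fused pass started at ws = -1 computes A's mark-then-whitespace result
theorem pvFusedLoop_start (text : String) (split_marks : List String) :
    ∀ L : List Int, (∀ i ∈ L, i ≠ -1) → pvFusedLoop text split_marks (-1) L =
      match pvMarkLoop text split_marks L with
      | some idx => idx
      | none =>
          match pvWsLoop text L with
          | some idx => idx
          | none => -1 := by
  intro L
  induction L with
  | nil => simp [pvFusedLoop, pvMarkLoop, pvWsLoop]
  | cons idx rest ih =>
      intro hmem
      simp only [pvFusedLoop, pvMarkLoop, pvWsLoop, pvMemMark_guard]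
      by_cases h : pvMemMark text split_marks idx = true
      · simp [h]
      · by_cases hsp : pvIsSpaceAt text idx = true
        · have hidx : idx ≠ -1 := hmem idx (List.mem_cons_self ..)
          simp [h, hsp, pvFusedLoop_set text split_marks idx hidx rest]
        · simp [h, hsp, ih (fun i hi => hmem i (List.mem_cons_of_mem _ hi))]

-- with no marks, A's first loop finds nothing
theorem pvMarkLoop_nil (text : String) :
    ∀ L : List Int, pvMarkLoop text [] L = none := by
  intro L
  induction L with
  | nil => rfl
  | cons idx rest ih =>
      have : pvMemMark text [] idx = false := by
        unfold pvMemMark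
        cases PySem.Str.pyGet? text (idx - 1) <;> simp
      simp [pvMarkLoop, this, ih]

-- ===== VERDICT (by name: the statement is the Claim_ definition above) =====
theorem find_split_index_spec : Claim_equal_find_split_index := by
  intro text max_length split_marks _
  unfold Spec_find_split_index find_split_index find_split_index_alt
  by_cases hml : max_length ≤ 0
  · simp [hml]
  · simp only [hml, if_false]
    set limit : Int := min (PySem.Str.len text) max_length with hlim
    have hpos : ∀ i ∈ PySem.List.pyRange limit 0 (-1), i ≠ -1 := by
      intro i hi
      have := (PySem.List.mem_pyRange_neg_one).mp hi
      omega
    rw [pvFusedLoop_start text split_marks _ hpos]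
    cases hsm : split_marks with
    | nil => simp [pvMarkLoop_nil]
    | cons m ms => simp
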